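-- pv_equiv track=rewrite | github.com/bobshen0721/new_whisperx | app.py | chunked_stream
-- ===== SOURCE A (Python) =====
-- from typing import Iterable
--
-- def chunked_stream(rows: list[dict], total_updates: int = 24) -> Iterable[list[dict]]:
--     if not rows:
--         return []
--
--     step = max(len(rows) // total_updates, 1)
--     output = []
--     for index in range(step, len(rows) + step, step):
--         output.append(rows[: min(index, len(rows))])
--     if output[-1] != rows:
--         output.append(rows)
--     return output
-- ===== SOURCE B (Python) =====
-- def chunked_stream(rows, total_updates=24):
--     if not rows:
--         return []
--     step = max(len(rows) // total_updates, 1)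
--     acc = []
--     output = []
--     for i in range(0, len(rows), step):
--         acc.extend(rows[i:i + step])
--         output.append(list(acc))
--     return output
-- ===== Notes on version B (the rewrite author's own statement) =====
-- stated objective: alternative
-- what changed: B replaces A's prefix re-slicing rows[:min(index,len)] over endpoints range(step, len+step, step) (plus A's trailing output[-1] check) with a growing accumulator: it iterates chunk starts range(0, len, step), extends a running buffer by each chunk and snapshots a copy, needing no min clamp and no final-element fixup.
import Mathlib
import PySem

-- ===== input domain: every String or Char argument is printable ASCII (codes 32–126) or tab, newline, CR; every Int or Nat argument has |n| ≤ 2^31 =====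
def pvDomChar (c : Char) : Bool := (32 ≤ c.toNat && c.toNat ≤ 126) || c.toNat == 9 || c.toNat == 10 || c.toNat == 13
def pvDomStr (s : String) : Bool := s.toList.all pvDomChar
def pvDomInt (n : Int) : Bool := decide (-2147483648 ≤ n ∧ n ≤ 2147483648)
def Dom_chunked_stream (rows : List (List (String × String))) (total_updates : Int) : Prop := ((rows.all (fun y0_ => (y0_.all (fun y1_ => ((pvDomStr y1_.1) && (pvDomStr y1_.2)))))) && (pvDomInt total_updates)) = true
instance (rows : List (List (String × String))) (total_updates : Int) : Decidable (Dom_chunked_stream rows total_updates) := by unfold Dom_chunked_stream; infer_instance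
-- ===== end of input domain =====

-- B builds the prefixes with a growing accumulator over chunk starts instead of
-- re-slicing rows[:min(index,len)] from the start at each endpoint (alternative
-- decomposition, same cost); return value only, neither version mutates its input.

-- ===== PORT A =====
def chunked_stream (rows : List (List (String × String))) (total_updates : Int) : List (List (List (String × String))) :=
  if rows = [] then []
  else
    let step : Int := max (PySem.Int.floordiv (PySem.List.len rows) total_updates) 1
    let output :=
      (PySem.List.pyRange step (PySem.List.len rows + step) step).foldl
        (fun out index => out ++ [PySem.List.slice rows none (some (min index (PySem.List.len rows)))]) []
    if PySem.List.pyGetD output (-1) [] ≠ rows then output ++ [rows] else output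

-- ===== PORT B =====
def chunked_stream_alt (rows : List (List (String × String))) (total_updates : Int) : List (List (List (String × String))) :=
  if rows = [] then []
  else
    let step : Int := max (PySem.Int.floordiv (PySem.List.len rows) total_updates) 1
    ((PySem.List.pyRange 0 (PySem.List.len rows) step).foldl
        (fun (st : List (List (String × String)) × List (List (List (String × String)))) i =>
          let acc := st.1 ++ PySem.List.slice rows (some i) (some (i + step))
          (acc, st.2 ++ [acc]))
        ([], [])).2

-- ===== PRECONDITION & SPEC =====
-- Pre_ excludes only nonempty rows with total_updates = 0, where Python A (and B) raise ZeroDivisionError.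
def Pre_chunked_stream (rows : List (List (String × String))) (total_updates : Int) : Prop :=
  rows = [] ∨ total_updates ≠ 0
instance (rows : List (List (String × String))) (total_updates : Int) : Decidable (Pre_chunked_stream rows total_updates) := by unfold Pre_chunked_stream; infer_instance
def pvWitness_chunked_stream : (List (List (String × String))) × Int := ([[("a", "1")], [("b", "2")], [("c", "3")]], 2)

def Spec_chunked_stream (rows : List (List (String × String))) (total_updates : Int) (out : List (List (List (String × String)))) : Prop := out = chunked_stream_alt rows total_updates
instance (rows : List (List (String × String))) (total_updates : Int) (out : List (List (List (String × String)))) : Decidable (Spec_chunked_stream rows total_updates out) := by unfold Spec_chunked_stream; infer_instance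

-- ===== CLAIM (what is proved, stated in full; the proofs are below) =====
def Claim_equal_chunked_stream : Prop := ∀ (rows : List (List (String × String))) (total_updates : Int), Dom_chunked_stream rows total_updates → Pre_chunked_stream rows total_updates → Spec_chunked_stream rows total_updates (chunked_stream rows total_updates)

-- ===== LEMMAS AND PROOFS =====

-- B's fold invariant: after m chunks the buffer is take (sN*m) and the output the list of snapshots.
theorem bfold_inv (rows : List (List (String × String))) (sN : Nat) (hs : 0 < sN) (m : Nat) :
    (((List.range m).map (fun k : Nat => ((sN : Int) * (k : Int)))).foldl
        (fun (st : List (List (String × String)) × List (List (List (String × String)))) i =>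
          let acc := st.1 ++ PySem.List.slice rows (some i) (some (i + (sN : Int)))
          (acc, st.2 ++ [acc]))
        ([], []))
      = (rows.take (sN * m), (List.range m).map (fun k : Nat => rows.take (sN * (k + 1)))) := by
  induction m with
  | zero => simp
  | succ m ih =>
    rw [List.range_succ, List.map_append, List.foldl_append, ih, List.map_append]
    simp only [List.map_cons, List.map_nil, List.foldl_cons, List.foldl_nil]
    have e1 : ((sN : Int)) * (m : Int) = ((sN * m : Nat) : Int) := by push_cast; ring
    have e2 : ((sN * m : Nat) : Int) + (sN : Int) = ((sN * m + sN : Nat) : Int) := by push_cast; ring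
    have hsl : PySem.List.slice rows (some ((sN : Int) * (m : Int))) (some ((sN : Int) * (m : Int) + (sN : Int)))
        = (rows.drop (sN * m)).take sN := by
      rw [e1, e2, PySem.List.slice_toNat rows (by positivity) (by positivity)]
      simp only [Int.toNat_natCast]
      have e3 : sN * m + sN - sN * m = sN := by omega
      rw [e3]
    rw [hsl, ← List.take_add, Nat.mul_succ]

theorem chunked_stream_spec : Claim_equal_chunked_stream := by
  intro rows tu _ hpre
  unfold Spec_chunked_stream chunked_stream chunked_stream_alt
  by_cases hnil : rows = []
  · simp [hnil]
  · simp only [if_neg hnil]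
    have hlen : PySem.List.len rows = ((rows.length : Nat) : Int) := by
      simp [PySem.List.len_eq]
    set s : Int := max (PySem.Int.floordiv (PySem.List.len rows) tu) 1 with hsdef
    have hs1 : (1 : Int) ≤ s := le_max_right _ _
    have hspos : (0 : Int) < s := by omega
    set nN : Nat := rows.length with hn
    have hnpos : 0 < nN := by
      rw [hn]; exact List.length_pos_iff.mpr hnil
    set sN : Nat := s.toNat with hsN
    have hsNpos : 0 < sN := by omega
    have hscast : s = (sN : Int) := by omega
    -- the common iteration count
    set m : Nat := (nN + sN - 1) / sN with hm
    have hdm := Nat.div_add_mod (nN + sN - 1) sN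
    have hmod := Nat.mod_lt (nN + sN - 1) hsNpos
    rw [← hm] at hdm
    have hcover : nN ≤ sN * m := by omega
    have hmpos : 0 < m := by
      rcases Nat.eq_zero_or_pos m with h | h
      · rw [h, Nat.mul_zero] at hcover; omega
      · exact h
    -- A's range
    have hrngA : PySem.List.pyRange s (PySem.List.len rows + s) s
        = (List.range m).map (fun k : Nat => s + s * (k : Int)) := by
      rw [PySem.List.pyRange_of_pos _ _ hspos, hlen, if_pos (by omega)]
      congr 2
      rw [hscast]
      have e1 : ((nN : Nat) : Int) + (sN : Int) - (sN : Int) + (sN : Int) - 1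
          = ((nN + sN - 1 : Nat) : Int) := by omega
      rw [e1, ← Int.natCast_div, Int.toNat_natCast, ← hm]
    -- B's range
    have hrngB : PySem.List.pyRange 0 (PySem.List.len rows) s
        = (List.range m).map (fun k : Nat => s * (k : Int)) := by
      rw [PySem.List.pyRange_of_pos _ _ hspos, hlen, if_pos (by exact_mod_cast hnpos)]
      congr 2
      · funext k; rw [zero_add]
      · rw [hscast]
        have e1 : ((nN : Nat) : Int) - 0 + (sN : Int) - 1
            = ((nN + sN - 1 : Nat) : Int) := by omega
        rw [e1, ← Int.natCast_div, Int.toNat_natCast, ← hm]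
    -- A's prefixes are takes
    have htakeA : ∀ k : Nat, PySem.List.slice rows none (some (min (s + s * (k : Int)) (PySem.List.len rows)))
        = rows.take (sN * (k + 1)) := by
      intro k
      have hb : (0 : Int) ≤ min (s + s * (k : Int)) (PySem.List.len rows) := by
        rw [hlen, hscast]
        exact le_min (by positivity) (by positivity)
      rw [PySem.List.slice_to rows hb]
      have e : s + s * (k : Int) = ((sN * (k + 1) : Nat) : Int) := by
        rw [hscast]; push_cast; ring
      rw [e, hlen]
      have h1 : (min ((sN * (k + 1) : Nat) : Int) ((nN : Nat) : Int)).toNat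
          = min (sN * (k + 1)) nN := by omega
      rw [h1, ← List.take_take, hn, List.take_length]
    have hA : (PySem.List.pyRange s (PySem.List.len rows + s) s).foldl
        (fun out index => out ++ [PySem.List.slice rows none (some (min index (PySem.List.len rows)))]) []
        = (List.range m).map (fun k : Nat => rows.take (sN * (k + 1))) := by
      rw [hrngA, PySem.List.foldl_append_singleton_eq_map, List.nil_append, List.map_map]
      exact List.map_congr_left (fun k _ => htakeA k)
    -- B's output via the fold invariant
    have hB : ((PySem.List.pyRange 0 (PySem.List.len rows) s).foldl
        (fun (st : List (List (String × String)) × List (List (List (String × String)))) i =>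
          let acc := st.1 ++ PySem.List.slice rows (some i) (some (i + s))
          (acc, st.2 ++ [acc]))
        ([], [])).2
        = (List.range m).map (fun k : Nat => rows.take (sN * (k + 1))) := by
      rw [hrngB, hscast, bfold_inv rows sN hsNpos m]
    -- A's trailing check never fires: the last prefix is all of rows
    have hlast : PySem.List.pyGetD ((List.range m).map (fun k : Nat => rows.take (sN * (k + 1)))) (-1) [] = rows := by
      have hm1 : m = (m - 1) + 1 := by omega
      rw [hm1, List.range_succ, List.map_append, List.map_cons, List.map_nil,
        PySem.List.pyGetD_neg_one_append_singleton]
      have h2 : sN * (m - 1 + 1) = sN * m := by rw [← hm1]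
      rw [h2]
      exact List.take_of_length_le (by omega)
    rw [hA, hB, hlast]
    simp
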